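-- pv_equiv track=rewrite | github.com/Cyril-Grelier/AlgoGen | algo_gen/individuals/STS.py | matrice_incoherences_totales
-- ===== SOURCE A (Python) =====
-- def transpose(m):
--     return list(map(list, zip(*m)))
--
-- def matrice_incoherences_totales(m, n):
--     matrice_incoherences = [[0] * (n // 2) for _ in range(n - 1)]
--     for num_s, semaine in enumerate(m):
--         present = [-1] * n
--         for a, b in semaine:
--             present[a] += 1
--             present[b] += 1
--         inco = list(map(abs, present))
--         for num_p, ab in enumerate(semaine):
--             a, b = ab
--             matrice_incoherences[num_s][num_p] += (inco[a] > 0) + (inco[b] > 0)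
--     m_t = transpose(m)
--     matrice_incoherences = transpose(matrice_incoherences)
--     for num_p, periode in enumerate(m_t):
--         present = [0] * n
--         for a, b in periode:
--             present[a] += 1
--             present[b] += 1
--         inco = [0 if v <= 2 else v - 2 for v in present]
--         for num_s, ab in enumerate(periode):
--             a, b = ab
--             matrice_incoherences[num_p][num_s] += (inco[a] > 0) + (inco[b] > 0)
--     return transpose(matrice_incoherences)
-- ===== SOURCE B (Python) =====
-- def _counts(n, games):
--     c = [0] * n
--     for a, b in games:
--         c[a] += 1
--         c[b] += 1
--     return c
--
-- def matrice_incoherences_totales(m, n):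
--     min_len = min(map(len, m), default=0)
--     week_counts = [_counts(n, week) for week in m]
--     period_counts = [_counts(n, [week[p] for week in m]) for p in range(min_len)]
--     result = []
--     for s in range(max(n - 1, 0)):
--         row = [0] * max(n // 2, 0)
--         if s < len(m):
--             wc = week_counts[s]
--             for p, (a, b) in enumerate(m[s]):
--                 v = (wc[a] != 1) + (wc[b] != 1)
--                 if p < min_len:
--                     pc = period_counts[p]
--                     v += (pc[a] > 2) + (pc[b] > 2)
--                 row[p] = v
--         result.append(row)
--     return result
-- ===== Notes on version B (the rewrite author's own statement) =====
-- stated objective: alternative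
-- what changed: Replaces A's two transpose-separated in-place fill passes (plus three matrix transposes) by two precomputed count tables (per-week and per-period, the latter only up to the zip-truncation length) and a single direct row-building pass with no transposes.
import Mathlib
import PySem

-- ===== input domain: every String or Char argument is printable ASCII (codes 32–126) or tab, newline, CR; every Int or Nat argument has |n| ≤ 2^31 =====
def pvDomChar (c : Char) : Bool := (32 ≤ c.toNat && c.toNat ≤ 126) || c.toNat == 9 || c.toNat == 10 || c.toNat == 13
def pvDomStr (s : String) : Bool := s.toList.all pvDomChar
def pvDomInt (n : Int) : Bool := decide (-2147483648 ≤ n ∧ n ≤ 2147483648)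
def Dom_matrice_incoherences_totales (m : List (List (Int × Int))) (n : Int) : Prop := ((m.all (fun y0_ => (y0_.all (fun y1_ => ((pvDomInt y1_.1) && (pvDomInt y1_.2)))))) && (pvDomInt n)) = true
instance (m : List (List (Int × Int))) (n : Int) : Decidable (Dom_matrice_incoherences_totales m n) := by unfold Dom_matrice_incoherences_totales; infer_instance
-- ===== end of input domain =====

-- B replaces A's two transpose-separated in-place fill passes by precomputed week/period
-- count tables and a single direct row-building pass (objective: alternative decomposition).

-- Shared helpers (both Pythons do the same `c[x] += 1` counting and use min week length):
-- Python list index for -len ≤ i < len (Pre_ guarantees team indices are in range).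
def pyIdx (n i : Int) : Nat := (if i < 0 then i + n else i).toNat

-- c[i] += 1
def bump (xs : List Int) (i : Nat) : List Int := xs.set i (xs.getD i 0 + 1)

-- present[a] += 1; present[b] += 1
def stepGame (n : Int) (c : List Int) (g : Int × Int) : List Int :=
  bump (bump c (pyIdx n g.1)) (pyIdx n g.2)

-- length of the shortest row, 0 for []: the truncation of zip(*m) / min(map(len, m), default=0)
def pyMinLen {α : Type} : List (List α) → Nat
  | [] => 0
  | w :: ws => ws.foldl (fun k u => Nat.min k u.length) w.length

-- ===== PORT A =====
-- transpose(m) = list(map(list, zip(*m))): zip truncates to the shortest row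
def pyTranspose {α : Type} (d : α) (m : List (List α)) : List (List α) :=
  (List.range (pyMinLen m)).map (fun p => m.map (fun w => w.getD p d))

-- inner loop `matrice[s][p] += v(ab)` over enumerate(week)
def addRow (row : List Int) (week : List (Int × Int)) (p : Nat) (v : Int × Int → Int) : List Int :=
  match week with
  | [] => row
  | g :: rest => addRow (row.set p (row.getD p 0 + v g)) rest (p + 1) v

-- outer loop `for num_s, semaine in enumerate(…)` mutating row num_s of the matrix
def fillRows (mat : List (List Int)) (ws : List (List (Int × Int))) (s : Nat)
    (F : List Int → List (Int × Int) → List Int) : List (List Int) :=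
  match ws with
  | [] => mat
  | w :: rest => fillRows (mat.set s (F (mat.getD s []) w)) rest (s + 1) F

-- (inco[a] > 0) + (inco[b] > 0)
def incoFlag (inco : List Int) (n : Int) (g : Int × Int) : Int :=
  (if 0 < inco.getD (pyIdx n g.1) 0 then 1 else 0) + (if 0 < inco.getD (pyIdx n g.2) 0 then 1 else 0)

-- week pass: present = [-1]*n, count, inco = map(abs, present)
def vWfun (n : Int) (week : List (Int × Int)) : Int × Int → Int :=
  incoFlag ((week.foldl (stepGame n) (List.replicate n.toNat (-1))).map (fun v => |v|)) n

def F1 (n : Int) : List Int → List (Int × Int) → List Int :=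
  fun row week => addRow row week 0 (vWfun n week)

-- period pass: present = [0]*n, count, inco = [0 if v <= 2 else v - 2 for v in present]
def vPfun (n : Int) (periode : List (Int × Int)) : Int × Int → Int :=
  incoFlag ((periode.foldl (stepGame n) (List.replicate n.toNat 0)).map (fun v => if v ≤ 2 then 0 else v - 2)) n

def F2 (n : Int) : List Int → List (Int × Int) → List Int :=
  fun row periode => addRow row periode 0 (vPfun n periode)

def matrice_incoherences_totales (m : List (List (Int × Int))) (n : Int) : List (List Int) :=
  let mat0 := List.replicate (n - 1).toNat (List.replicate (PySem.Int.floordiv n 2).toNat 0)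
  let mat1 := fillRows mat0 m 0 (F1 n)
  let mt := pyTranspose (0, 0) m
  let mat2 := fillRows (pyTranspose 0 mat1) mt 0 (F2 n)
  pyTranspose 0 mat2

-- ===== PORT B =====
-- _counts(n, games): occurrence table over teams
def counts (n : Int) (games : List (Int × Int)) : List Int :=
  games.foldl (stepGame n) (List.replicate n.toNat 0)

-- `for p, (a, b) in enumerate(week): row[p] = v(p, (a, b))`
def setRow (row : List Int) (week : List (Int × Int)) (p : Nat) (v : Nat → Int × Int → Int) : List Int :=
  match week with
  | [] => row
  | g :: rest => setRow (row.set p (v p g)) rest (p + 1) v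

-- the entry value: week-count flags plus (below the zip-truncation length) period-count flags
def vBfun (n : Int) (minL : Nat) (wc : List Int) (pcs : List (List Int)) : Nat → Int × Int → Int :=
  fun p g =>
    ((if wc.getD (pyIdx n g.1) 0 ≠ 1 then 1 else 0) + (if wc.getD (pyIdx n g.2) 0 ≠ 1 then 1 else 0))
    + (if p < minL then
        (if 2 < (pcs.getD p []).getD (pyIdx n g.1) 0 then 1 else 0)
        + (if 2 < (pcs.getD p []).getD (pyIdx n g.2) 0 then 1 else 0)
      else 0)

def matrice_incoherences_totales_alt (m : List (List (Int × Int))) (n : Int) : List (List Int) :=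
  let minL := pyMinLen m
  let wcs := m.map (counts n)
  let pcs := (List.range minL).map (fun p => counts n (m.map (fun w => w.getD p (0, 0))))
  (List.range (n - 1).toNat).map (fun s =>
    if s < m.length then
      setRow (List.replicate (PySem.Int.floordiv n 2).toNat 0) (m.getD s []) 0
        (vBfun n minL (wcs.getD s []) pcs)
    else List.replicate (PySem.Int.floordiv n 2).toNat 0)

-- ===== PRECONDITION & SPEC =====
-- Pre_ = exactly the inputs on which A returns (no IndexError): every nonempty week sits at
-- an index < n-1 and has at most n//2 games, and every team is a valid Python index into a
-- length-n list (-n ≤ t < n).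
def Pre_matrice_incoherences_totales (m : List (List (Int × Int))) (n : Int) : Prop :=
  ∀ i < m.length,
    (m.getD i [] ≠ [] →
      ((i : Int) < n - 1 ∧ ((m.getD i []).length : Int) ≤ PySem.Int.floordiv n 2)) ∧
    ∀ g ∈ m.getD i [], (-n ≤ g.1 ∧ g.1 < n) ∧ (-n ≤ g.2 ∧ g.2 < n)

instance (m : List (List (Int × Int))) (n : Int) : Decidable (Pre_matrice_incoherences_totales m n) := by
  unfold Pre_matrice_incoherences_totales; infer_instance

def pvWitness_matrice_incoherences_totales : (List (List (Int × Int))) × Int :=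
  ([[(0, 1), (2, 3)], [(0, 2), (1, 3)], [(0, 3), (1, 2)]], 4)

def Spec_matrice_incoherences_totales (m : List (List (Int × Int))) (n : Int) (out : List (List Int)) : Prop := out = matrice_incoherences_totales_alt m n
instance (m : List (List (Int × Int))) (n : Int) (out : List (List Int)) : Decidable (Spec_matrice_incoherences_totales m n out) := by unfold Spec_matrice_incoherences_totales; infer_instance

-- ===== CLAIM (what is proved, stated in full; the proofs are below) =====
def Claim_equal_matrice_incoherences_totales : Prop := ∀ (m : List (List (Int × Int))) (n : Int), Dom_matrice_incoherences_totales m n → Pre_matrice_incoherences_totales m n → Spec_matrice_incoherences_totales m n (matrice_incoherences_totales m n)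

-- ===== LEMMAS AND PROOFS =====

theorem getD_lt {α : Type} (l : List α) (i : Nat) (d : α) (h : i < l.length) :
    l.getD i d = l[i] := by
  induction l generalizing i with
  | nil => simp at h
  | cons x xs ih =>
    cases i with
    | zero => simp
    | succ i => simpa using ih i (by simpa using h)

theorem getD_mem {α : Type} (l : List α) (i : Nat) (d : α) (h : i < l.length) :
    l.getD i d ∈ l := by
  rw [getD_lt _ _ _ h]
  exact List.getElem_mem h

theorem getD_set_eq {α : Type} (xs : List α) (j : Nat) (v : α) (i : Nat) (d : α) :
    (xs.set j v).getD i d = if i = j ∧ j < xs.length then v else xs.getD i d := by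
  induction xs generalizing i j with
  | nil => simp
  | cons x xs ih =>
    cases j with
    | zero =>
      cases i with
      | zero => simp
      | succ i => simp
    | succ j =>
      cases i with
      | zero => simp
      | succ i =>
        simp only [List.set_cons_succ, List.getD_cons_succ, List.length_cons, ih]
        by_cases h1 : i = j ∧ j < xs.length
        · rw [if_pos h1, if_pos (by omega)]
        · rw [if_neg h1, if_neg (by omega)]

theorem getD_replicate {α : Type} (k : Nat) (a : α) (i : Nat) (d : α) (h : i < k) :
    (List.replicate k a).getD i d = a := by
  rw [getD_lt _ _ _ (by simpa using h)]
  simp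

theorem getD_map_col {α : Type} (l : List (List α)) (pcol i : Nat) (d : α) (h : i < l.length) :
    (l.map (fun w => w.getD pcol d)).getD i d = (l.getD i []).getD pcol d := by
  rw [getD_lt _ _ _ (by simpa using h), List.getElem_map, getD_lt l i [] h]

theorem getD_map_counts (n : Int) (m : List (List (Int × Int))) (s : Nat) (h : s < m.length) :
    (m.map (counts n)).getD s [] = counts n (m.getD s []) := by
  rw [getD_lt _ _ _ (by simpa using h), List.getElem_map, getD_lt m s [] h]

theorem getD_map_abs (l : List Int) (i : Nat) (h : i < l.length) :
    (l.map (fun v => |v|)).getD i 0 = |l.getD i 0| := by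
  rw [getD_lt _ _ _ (by simpa using h), List.getElem_map, getD_lt l i 0 h]

theorem getD_map_inco (l : List Int) (i : Nat) (h : i < l.length) :
    (l.map (fun v => if v ≤ 2 then 0 else v - 2)).getD i 0
      = if l.getD i 0 ≤ 2 then 0 else l.getD i 0 - 2 := by
  rw [getD_lt _ _ _ (by simpa using h), List.getElem_map, getD_lt l i 0 h]

theorem getD_pcs (n : Int) (m : List (List (Int × Int))) (k p : Nat) (h : p < k) :
    ((List.range k).map (fun p => counts n (m.map (fun w => w.getD p (0, 0))))).getD p []
      = counts n (m.map (fun w => w.getD p (0, 0))) := by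
  rw [getD_lt _ _ _ (by simpa using h)]
  simp

theorem bump_length (xs : List Int) (j : Nat) : (bump xs j).length = xs.length := by
  simp [bump]

theorem length_stepGame (n : Int) (c : List Int) (g : Int × Int) :
    (stepGame n c g).length = c.length := by
  simp [stepGame, bump]

theorem length_foldl_step (games : List (Int × Int)) (n : Int) (c : List Int) :
    (games.foldl (stepGame n) c).length = c.length := by
  induction games generalizing c with
  | nil => rfl
  | cons g gs ih => simp [List.foldl_cons, ih, length_stepGame]

theorem bump_shift (len j : Nat) (d : Int) (xs ys : List Int)
    (hx : xs.length = len) (hy : ys.length = len)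
    (h : ∀ i, i < len → xs.getD i 0 = ys.getD i 0 + d) :
    ∀ i, i < len → (bump xs j).getD i 0 = (bump ys j).getD i 0 + d := by
  intro i hi
  simp only [bump, getD_set_eq, hx, hy]
  by_cases hc : i = j ∧ j < len
  · rw [if_pos hc, if_pos hc]
    have := h j hc.2
    omega
  · rw [if_neg hc, if_neg hc]
    exact h i hi

theorem foldl_step_shift (games : List (Int × Int)) (n d : Int) (len : Nat) :
    ∀ (xs ys : List Int), xs.length = len → ys.length = len →
      (∀ i, i < len → xs.getD i 0 = ys.getD i 0 + d) →
      ∀ i, i < len →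
        (games.foldl (stepGame n) xs).getD i 0 = (games.foldl (stepGame n) ys).getD i 0 + d := by
  induction games with
  | nil => intro xs ys hx hy h i hi; exact h i hi
  | cons g gs ih =>
    intro xs ys hx hy h
    simp only [List.foldl_cons]
    refine ih (stepGame n xs g) (stepGame n ys g)
      (by rw [length_stepGame, hx]) (by rw [length_stepGame, hy]) ?_
    intro i hi
    have h1 := bump_shift len (pyIdx n g.1) d xs ys hx hy h
    show (bump (bump xs (pyIdx n g.1)) (pyIdx n g.2)).getD i 0
        = (bump (bump ys (pyIdx n g.1)) (pyIdx n g.2)).getD i 0 + d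
    exact bump_shift len (pyIdx n g.2) d _ _
      (by rw [bump_length, hx]) (by rw [bump_length, hy]) h1 i hi

theorem fillRows_nil (F : List Int → List (Int × Int) → List Int) :
    ∀ (ws : List (List (Int × Int))) (s : Nat), fillRows [] ws s F = [] := by
  intro ws
  induction ws with
  | nil => intro s; rfl
  | cons w rest ih => intro s; simpa [fillRows] using ih (s + 1)

theorem fillRows_length (F : List Int → List (Int × Int) → List Int) :
    ∀ (ws : List (List (Int × Int))) (mat : List (List Int)) (s : Nat),
      (fillRows mat ws s F).length = mat.length := by
  intro ws
  induction ws with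
  | nil => intro mat s; rfl
  | cons w rest ih => intro mat s; simp [fillRows, ih]

theorem fillRows_getD (F : List Int → List (Int × Int) → List Int) :
    ∀ (ws : List (List (Int × Int))) (mat : List (List Int)) (s i : Nat), i < mat.length →
      (fillRows mat ws s F).getD i []
        = if s ≤ i ∧ i - s < ws.length then F (mat.getD i []) (ws.getD (i - s) [])
          else mat.getD i [] := by
  intro ws
  induction ws with
  | nil => intro mat s i hi; simp [fillRows]
  | cons w rest ih =>
    intro mat s i hi
    simp only [fillRows, List.length_cons]
    rw [ih (mat.set s (F (mat.getD s []) w)) (s + 1) i (by simpa using hi)]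
    have hset := getD_set_eq mat s (F (mat.getD s []) w) i []
    rcases Nat.lt_trichotomy i s with hlt | heq | hgt
    · rw [if_neg (show ¬(s + 1 ≤ i ∧ i - (s + 1) < rest.length) by omega),
          if_neg (show ¬(s ≤ i ∧ i - s < rest.length + 1) by omega),
          hset, if_neg (show ¬(i = s ∧ s < mat.length) by omega)]
    · subst heq
      rw [if_neg (show ¬(i + 1 ≤ i ∧ i - (i + 1) < rest.length) by omega),
          hset, if_pos ⟨rfl, hi⟩,
          if_pos (show i ≤ i ∧ i - i < rest.length + 1 by omega)]
      simp
    · rw [hset, if_neg (show ¬(i = s ∧ s < mat.length) by omega)]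
      by_cases hc : s + 1 ≤ i ∧ i - (s + 1) < rest.length
      · rw [if_pos hc, if_pos (show s ≤ i ∧ i - s < rest.length + 1 by omega)]
        have h2 : i - s = (i - (s + 1)) + 1 := by omega
        rw [h2, List.getD_cons_succ]
      · rw [if_neg hc, if_neg (show ¬(s ≤ i ∧ i - s < rest.length + 1) by omega)]

theorem addRow_length (v : Int × Int → Int) :
    ∀ (week : List (Int × Int)) (row : List Int) (p : Nat),
      (addRow row week p v).length = row.length := by
  intro week
  induction week with
  | nil => intro row p; rfl
  | cons g rest ih => intro row p; simp [addRow, ih]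

theorem addRow_getD (v : Int × Int → Int) :
    ∀ (week : List (Int × Int)) (row : List Int) (p i : Nat), i < row.length →
      (addRow row week p v).getD i 0
        = if p ≤ i ∧ i - p < week.length then row.getD i 0 + v (week.getD (i - p) (0, 0))
          else row.getD i 0 := by
  intro week
  induction week with
  | nil => intro row p i hi; simp [addRow]
  | cons g rest ih =>
    intro row p i hi
    simp only [addRow, List.length_cons]
    rw [ih (row.set p (row.getD p 0 + v g)) (p + 1) i (by simpa using hi)]
    have hset := getD_set_eq row p (row.getD p 0 + v g) i 0
    rcases Nat.lt_trichotomy i p with hlt | heq | hgt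
    · rw [if_neg (show ¬(p + 1 ≤ i ∧ i - (p + 1) < rest.length) by omega),
          if_neg (show ¬(p ≤ i ∧ i - p < rest.length + 1) by omega),
          hset, if_neg (show ¬(i = p ∧ p < row.length) by omega)]
    · subst heq
      rw [if_neg (show ¬(i + 1 ≤ i ∧ i - (i + 1) < rest.length) by omega),
          hset, if_pos ⟨rfl, hi⟩,
          if_pos (show i ≤ i ∧ i - i < rest.length + 1 by omega)]
      simp
    · rw [hset, if_neg (show ¬(i = p ∧ p < row.length) by omega)]
      by_cases hc : p + 1 ≤ i ∧ i - (p + 1) < rest.length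
      · rw [if_pos hc, if_pos (show p ≤ i ∧ i - p < rest.length + 1 by omega)]
        have h2 : i - p = (i - (p + 1)) + 1 := by omega
        rw [h2, List.getD_cons_succ]
      · rw [if_neg hc, if_neg (show ¬(p ≤ i ∧ i - p < rest.length + 1) by omega)]

theorem setRow_length (v : Nat → Int × Int → Int) :
    ∀ (week : List (Int × Int)) (row : List Int) (p : Nat),
      (setRow row week p v).length = row.length := by
  intro week
  induction week with
  | nil => intro row p; rfl
  | cons g rest ih => intro row p; simp [setRow, ih]

theorem setRow_getD (v : Nat → Int × Int → Int) :
    ∀ (week : List (Int × Int)) (row : List Int) (p i : Nat), i < row.length →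
      (setRow row week p v).getD i 0
        = if p ≤ i ∧ i - p < week.length then v i (week.getD (i - p) (0, 0))
          else row.getD i 0 := by
  intro week
  induction week with
  | nil => intro row p i hi; simp [setRow]
  | cons g rest ih =>
    intro row p i hi
    simp only [setRow, List.length_cons]
    rw [ih (row.set p (v p g)) (p + 1) i (by simpa using hi)]
    have hset := getD_set_eq row p (v p g) i 0
    rcases Nat.lt_trichotomy i p with hlt | heq | hgt
    · rw [if_neg (show ¬(p + 1 ≤ i ∧ i - (p + 1) < rest.length) by omega),
          if_neg (show ¬(p ≤ i ∧ i - p < rest.length + 1) by omega),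
          hset, if_neg (show ¬(i = p ∧ p < row.length) by omega)]
    · subst heq
      rw [if_neg (show ¬(i + 1 ≤ i ∧ i - (i + 1) < rest.length) by omega),
          hset, if_pos ⟨rfl, hi⟩,
          if_pos (show i ≤ i ∧ i - i < rest.length + 1 by omega)]
      simp
    · rw [hset, if_neg (show ¬(i = p ∧ p < row.length) by omega)]
      by_cases hc : p + 1 ≤ i ∧ i - (p + 1) < rest.length
      · rw [if_pos hc, if_pos (show p ≤ i ∧ i - p < rest.length + 1 by omega)]
        have h2 : i - p = (i - (p + 1)) + 1 := by omega
        rw [h2, List.getD_cons_succ]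
      · rw [if_neg hc, if_neg (show ¬(p ≤ i ∧ i - p < rest.length + 1) by omega)]

theorem foldl_min_le {α : Type} : ∀ (ws : List (List α)) (a : Nat),
    (ws.foldl (fun k u => Nat.min k u.length) a ≤ a) ∧
    ∀ w ∈ ws, ws.foldl (fun k u => Nat.min k u.length) a ≤ w.length := by
  intro ws
  induction ws with
  | nil =>
    intro a
    exact ⟨Nat.le_refl a, by simp⟩
  | cons u us ih =>
    intro a
    simp only [List.foldl_cons]
    refine ⟨le_trans (ih (Nat.min a u.length)).1 (Nat.min_le_left _ _), ?_⟩
    intro w hw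
    rcases List.mem_cons.mp hw with rfl | hw
    · exact le_trans (ih (Nat.min a w.length)).1 (Nat.min_le_right _ _)
    · exact (ih (Nat.min a u.length)).2 w hw

theorem pyMinLen_le {α : Type} (m : List (List α)) : ∀ w ∈ m, pyMinLen m ≤ w.length := by
  cases m with
  | nil => simp
  | cons w0 ws =>
    intro w hw
    rcases List.mem_cons.mp hw with rfl | hw
    · exact (foldl_min_le ws w.length).1
    · exact (foldl_min_le ws w0.length).2 w hw

theorem foldl_min_const {α : Type} (c : Nat) : ∀ (ws : List (List α)),
    (∀ u ∈ ws, u.length = c) → ws.foldl (fun k u => Nat.min k u.length) c = c := by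
  intro ws
  induction ws with
  | nil => intro _; rfl
  | cons u us ih =>
    intro h
    simp only [List.foldl_cons]
    rw [h u List.mem_cons_self, (show Nat.min c c = c by simp)]
    exact ih (fun v hv => h v (List.mem_cons_of_mem _ hv))

theorem pyMinLen_const {α : Type} (m : List (List α)) (c : Nat) (h0 : m ≠ [])
    (h : ∀ w ∈ m, w.length = c) : pyMinLen m = c := by
  cases m with
  | nil => exact absurd rfl h0
  | cons w ws =>
    simp only [pyMinLen]
    rw [h w (List.mem_cons_self)]
    exact foldl_min_const c ws (fun v hv => h v (List.mem_cons_of_mem _ hv))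

theorem pyTranspose_nil {α : Type} (d : α) : pyTranspose d ([] : List (List α)) = [] := by
  simp [pyTranspose, pyMinLen]

theorem pyTranspose_length {α : Type} (d : α) (m : List (List α)) :
    (pyTranspose d m).length = pyMinLen m := by
  simp [pyTranspose]

theorem pyTranspose_getD {α : Type} (d : α) (m : List (List α)) (i : Nat) (h : i < pyMinLen m) :
    (pyTranspose d m).getD i [] = m.map (fun w => w.getD i d) := by
  unfold pyTranspose
  rw [getD_lt _ _ _ (by simpa using h)]
  simp

theorem pyIdx_lt (n a : Int) (h1 : -n ≤ a) (h2 : a < n) : pyIdx n a < n.toNat := by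
  unfold pyIdx
  split_ifs with h <;> omega

theorem flag_eq (x y : Int) (h : x = y + (-1)) :
    (if 0 < |x| then (1 : Int) else 0) = if y ≠ 1 then 1 else 0 := by
  subst h
  by_cases hy : y = 1
  · simp [hy]
  · rw [if_pos (abs_pos.mpr (by omega)), if_pos hy]

theorem pflag_eq (x : Int) :
    (if 0 < (if x ≤ 2 then (0 : Int) else x - 2) then (1 : Int) else 0) = if 2 < x then 1 else 0 := by
  by_cases h : x ≤ 2
  · rw [if_pos h, if_neg (show ¬(0:Int) < 0 by omega), if_neg (show ¬(2:Int) < x by omega)]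
  · rw [if_neg h, if_pos (show (0:Int) < x - 2 by omega), if_pos (show (2:Int) < x by omega)]

theorem weekFlag_eq (n : Int) (week : List (Int × Int)) (g : Int × Int)
    (hg1 : pyIdx n g.1 < n.toNat) (hg2 : pyIdx n g.2 < n.toNat) :
    vWfun n week g
      = (if (counts n week).getD (pyIdx n g.1) 0 ≠ 1 then (1 : Int) else 0)
        + (if (counts n week).getD (pyIdx n g.2) 0 ≠ 1 then (1 : Int) else 0) := by
  have hlenA : (week.foldl (stepGame n) (List.replicate n.toNat (-1))).length = n.toNat := by
    rw [length_foldl_step]; simp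
  have hshift := foldl_step_shift week n (-1) n.toNat
    (List.replicate n.toNat (-1)) (List.replicate n.toNat 0) (by simp) (by simp)
    (fun i hi => by rw [getD_replicate _ _ _ _ hi, getD_replicate _ _ _ _ hi]; ring)
  unfold vWfun incoFlag
  rw [getD_map_abs _ _ (by rw [hlenA]; exact hg1), getD_map_abs _ _ (by rw [hlenA]; exact hg2)]
  rw [flag_eq _ _ (hshift _ hg1), flag_eq _ _ (hshift _ hg2)]
  rfl

theorem periodFlag_eq (n : Int) (per : List (Int × Int)) (g : Int × Int)
    (hg1 : pyIdx n g.1 < n.toNat) (hg2 : pyIdx n g.2 < n.toNat) :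
    vPfun n per g
      = (if 2 < (counts n per).getD (pyIdx n g.1) 0 then (1 : Int) else 0)
        + (if 2 < (counts n per).getD (pyIdx n g.2) 0 then (1 : Int) else 0) := by
  have hlen : (per.foldl (stepGame n) (List.replicate n.toNat 0)).length = n.toNat := by
    rw [length_foldl_step]; simp
  unfold vPfun incoFlag
  rw [getD_map_inco _ _ (by rw [hlen]; exact hg1), getD_map_inco _ _ (by rw [hlen]; exact hg2)]
  rw [pflag_eq, pflag_eq]
  rfl

theorem main_eq (m : List (List (Int × Int))) (n : Int)
    (hpre : Pre_matrice_incoherences_totales m n) :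
    matrice_incoherences_totales m n = matrice_incoherences_totales_alt m n := by
  have hAdef : matrice_incoherences_totales m n
      = pyTranspose 0 (fillRows
          (pyTranspose 0 (fillRows
            (List.replicate (n - 1).toNat (List.replicate (PySem.Int.floordiv n 2).toNat 0))
            m 0 (F1 n)))
          (pyTranspose (0, 0) m) 0 (F2 n)) := rfl
  have hBdef : matrice_incoherences_totales_alt m n
      = (List.range (n - 1).toNat).map (fun s =>
          if s < m.length then
            setRow (List.replicate (PySem.Int.floordiv n 2).toNat 0) (m.getD s []) 0
              (vBfun n (pyMinLen m) ((m.map (counts n)).getD s [])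
                ((List.range (pyMinLen m)).map (fun p => counts n (m.map (fun w => w.getD p (0, 0))))))
          else List.replicate (PySem.Int.floordiv n 2).toNat 0) := rfl
  by_cases hr0 : (n - 1).toNat = 0
  · rw [hAdef, hBdef, hr0]
    simp [fillRows_nil, pyTranspose_nil]
  · have hTeam : ∀ i, i < m.length → ∀ g ∈ m.getD i [],
        pyIdx n g.1 < n.toNat ∧ pyIdx n g.2 < n.toNat := by
      intro i hi g hgmem
      obtain ⟨h1, h2⟩ := (hpre i hi).2 g hgmem
      exact ⟨pyIdx_lt n g.1 h1.1 h1.2, pyIdx_lt n g.2 h2.1 h2.2⟩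
    have hc0 : 0 < (PySem.Int.floordiv n 2).toNat := by
      rw [PySem.Int.floordiv_eq_ediv_of_pos (by omega : (0 : Int) < 2)]
      omega
    set mat1 := fillRows
        (List.replicate (n - 1).toNat (List.replicate (PySem.Int.floordiv n 2).toNat 0))
        m 0 (F1 n) with hmat1def
    set mt := pyTranspose (0, 0) m with hmtdef
    set mat2 := fillRows (pyTranspose 0 mat1) mt 0 (F2 n) with hmat2def
    have hmat1_len : mat1.length = (n - 1).toNat := by
      rw [hmat1def, fillRows_length]; simp
    have hmat1_row : ∀ s, s < (n - 1).toNat →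
        mat1.getD s [] = if s < m.length
          then addRow (List.replicate (PySem.Int.floordiv n 2).toNat 0) (m.getD s []) 0
                 (vWfun n (m.getD s []))
          else List.replicate (PySem.Int.floordiv n 2).toNat 0 := by
      intro s hs
      rw [hmat1def, fillRows_getD _ _ _ _ _ (by simpa using hs)]
      rw [getD_replicate _ _ _ _ hs]
      simp only [Nat.zero_le, true_and, Nat.sub_zero, F1]
    have hmat1_rowlen : ∀ w ∈ mat1, w.length = (PySem.Int.floordiv n 2).toNat := by
      intro w hw
      obtain ⟨i, hi, rfl⟩ := List.mem_iff_getElem.mp hw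
      rw [← getD_lt _ _ _ hi, hmat1_row i (by rwa [hmat1_len] at hi)]
      split_ifs
      · rw [addRow_length]; simp
      · simp
    have hmat1_min : pyMinLen mat1 = (PySem.Int.floordiv n 2).toNat := by
      refine pyMinLen_const _ _ ?_ hmat1_rowlen
      intro h
      rw [h] at hmat1_len
      simp at hmat1_len
      omega
    have hmatT_len : (pyTranspose 0 mat1).length = (PySem.Int.floordiv n 2).toNat := by
      rw [pyTranspose_length, hmat1_min]
    have hmatT_row : ∀ p, p < (PySem.Int.floordiv n 2).toNat →
        (pyTranspose 0 mat1).getD p [] = mat1.map (fun w => w.getD p 0) := by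
      intro p hp
      exact pyTranspose_getD _ _ _ (by rw [hmat1_min]; exact hp)
    have hmt_len : mt.length = pyMinLen m := by
      rw [hmtdef, pyTranspose_length]
    have hmt_row : ∀ p, p < pyMinLen m → mt.getD p [] = m.map (fun w => w.getD p (0, 0)) := by
      intro p hp
      rw [hmtdef]
      exact pyTranspose_getD _ _ _ hp
    have hmat2_len : mat2.length = (PySem.Int.floordiv n 2).toNat := by
      rw [hmat2def, fillRows_length, hmatT_len]
    have hmat2_row : ∀ p, p < (PySem.Int.floordiv n 2).toNat →
        mat2.getD p [] = if p < pyMinLen m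
          then addRow (mat1.map (fun w => w.getD p 0)) (m.map (fun w => w.getD p (0, 0))) 0
                 (vPfun n (m.map (fun w => w.getD p (0, 0))))
          else mat1.map (fun w => w.getD p 0) := by
      intro p hp
      rw [hmat2def, fillRows_getD _ _ _ _ _ (by rw [hmatT_len]; exact hp)]
      simp only [Nat.zero_le, true_and, Nat.sub_zero, hmt_len]
      by_cases hpμ : p < pyMinLen m
      · rw [if_pos hpμ, if_pos hpμ, hmatT_row p hp, hmt_row p hpμ]
        rfl
      · rw [if_neg hpμ, if_neg hpμ, hmatT_row p hp]
    have hmat2_rowlen : ∀ w ∈ mat2, w.length = (n - 1).toNat := by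
      intro w hw
      obtain ⟨i, hi, rfl⟩ := List.mem_iff_getElem.mp hw
      rw [← getD_lt _ _ _ hi, hmat2_row i (by rwa [hmat2_len] at hi)]
      split_ifs
      · rw [addRow_length]; simp [hmat1_len]
      · simp [hmat1_len]
    have hmat2_min : pyMinLen mat2 = (n - 1).toNat := by
      refine pyMinLen_const _ _ ?_ hmat2_rowlen
      intro h
      rw [h] at hmat2_len
      simp at hmat2_len
      omega
    rw [hAdef, hBdef]
    apply List.ext_getElem
    · rw [pyTranspose_length, hmat2_min]
      simp
    intro s h1 h2
    have hs : s < (n - 1).toNat := by simpa using h2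
    rw [← getD_lt _ s ([] : List Int) h1, ← getD_lt _ s ([] : List Int) h2]
    rw [pyTranspose_getD 0 mat2 s (by rw [hmat2_min]; exact hs)]
    rw [getD_lt _ _ _ (by simpa using hs)]
    simp only [List.getElem_map, List.getElem_range]
    apply List.ext_getElem
    · simp only [List.length_map, hmat2_len]
      split_ifs with hsl
      · rw [setRow_length]; simp
      · simp
    intro p hp1 hp2
    have hpc : p < (PySem.Int.floordiv n 2).toNat := by
      simpa [hmat2_len] using hp1
    rw [← getD_lt _ p (0 : Int) hp1, ← getD_lt _ p (0 : Int) hp2]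
    rw [getD_map_col mat2 s p 0 (by rw [hmat2_len]; exact hpc)]
    rw [hmat2_row p hpc]
    by_cases hsl : s < m.length
    · rw [if_pos hsl]
      rw [setRow_getD _ _ _ _ _ (by simpa using hpc)]
      simp only [Nat.zero_le, true_and, Nat.sub_zero]
      by_cases hpw : p < (m.getD s []).length
      · rw [if_pos hpw]
        have hg : (m.getD s []).getD p (0, 0) ∈ m.getD s [] := getD_mem _ _ _ hpw
        obtain ⟨hg1, hg2⟩ := hTeam s hsl _ hg
        rw [getD_map_counts n m s hsl]
        simp only [vBfun]
        by_cases hpμ : p < pyMinLen m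
        · rw [if_pos hpμ, if_pos hpμ]
          rw [addRow_getD _ _ _ _ _ (by rw [List.length_map, hmat1_len]; exact hs)]
          simp only [Nat.zero_le, true_and, Nat.sub_zero, List.length_map]
          rw [if_pos hsl]
          rw [getD_map_col mat1 p s 0 (by rw [hmat1_len]; exact hs)]
          rw [getD_map_col m p s (0, 0) hsl]
          rw [hmat1_row s hs, if_pos hsl]
          rw [addRow_getD _ _ _ _ _ (by simpa using hpc)]
          simp only [Nat.zero_le, true_and, Nat.sub_zero]
          rw [if_pos hpw, getD_replicate _ _ _ _ hpc]
          rw [getD_pcs n m _ p hpμ]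
          rw [weekFlag_eq n (m.getD s []) _ hg1 hg2]
          rw [periodFlag_eq n (m.map (fun w => w.getD p (0, 0))) _ hg1 hg2]
          ring
        · rw [if_neg hpμ, if_neg hpμ]
          rw [getD_map_col mat1 p s 0 (by rw [hmat1_len]; exact hs)]
          rw [hmat1_row s hs, if_pos hsl]
          rw [addRow_getD _ _ _ _ _ (by simpa using hpc)]
          simp only [Nat.zero_le, true_and, Nat.sub_zero]
          rw [if_pos hpw, getD_replicate _ _ _ _ hpc]
          rw [weekFlag_eq n (m.getD s []) _ hg1 hg2]
          ring
      · rw [if_neg hpw, getD_replicate _ _ _ _ hpc]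
        have hpμ : ¬ p < pyMinLen m := by
          have := pyMinLen_le m (m.getD s []) (getD_mem _ _ _ hsl)
          omega
        rw [if_neg hpμ]
        rw [getD_map_col mat1 p s 0 (by rw [hmat1_len]; exact hs)]
        rw [hmat1_row s hs, if_pos hsl]
        rw [addRow_getD _ _ _ _ _ (by simpa using hpc)]
        simp only [Nat.zero_le, true_and, Nat.sub_zero]
        rw [if_neg hpw, getD_replicate _ _ _ _ hpc]
    · rw [if_neg hsl, getD_replicate _ _ _ _ hpc]
      have hLHS0 : (mat1.getD s []).getD p 0 = 0 := by
        rw [hmat1_row s hs, if_neg hsl, getD_replicate _ _ _ _ hpc]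
      by_cases hpμ : p < pyMinLen m
      · rw [if_pos hpμ]
        rw [addRow_getD _ _ _ _ _ (by rw [List.length_map, hmat1_len]; exact hs)]
        simp only [Nat.zero_le, true_and, Nat.sub_zero, List.length_map]
        rw [if_neg hsl]
        rw [getD_map_col mat1 p s 0 (by rw [hmat1_len]; exact hs)]
        exact hLHS0
      · rw [if_neg hpμ]
        rw [getD_map_col mat1 p s 0 (by rw [hmat1_len]; exact hs)]
        exact hLHS0

-- ===== VERDICT (by name: the statement is the Claim_ definition above) =====
theorem matrice_incoherences_totales_spec : Claim_equal_matrice_incoherences_totales := by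
  intro m n _ hpre
  exact main_eq m n hpre
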